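-- pv_equiv track=rewrite | github.com/afshin-arj/SHAMS-0D-Tokamak-Design-Studio | shams_fix/src/systems/cartography2.py | mechanism_group_histogram
-- ===== SOURCE A (Python) =====
-- from typing import Any, Dict, List
-- from collections import Counter
--
-- def mechanism_histogram(atlas: Dict[str, Any]) -> Dict[str, int]:
--     dom = atlas.get('dominant')
--     if not isinstance(dom, list):
--         return {}
--     c = Counter()
--     for row in dom:
--         if not isinstance(row, list):
--             continue
--         for x in row:
--             s = str(x)
--             if not s:
--                 continue
--             c[s] += 1
--     return dict(c)
--
-- def mechanism_group(name: str) -> str: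
--     s = str(name).lower()
--     # Control / dynamics contracts
--     if 'vs control' in s or 'pf waveform' in s or 'sol radiation fraction required' in s:
--         return 'CONTROL'
--     # Exhaust / divertor
--     if 'divertor' in s or 'q_parallel' in s or 'q||' in s or 'sol' in s:
--         return 'EXHAUST'
--     # MHD / limits
--     if 'mhd' in s or 'beta' in s or 'q95' in s or 'greenwald' in s:
--         return 'PLASMA_LIMITS'
--     # Magnets / coils / build
--     if 'tf ' in s or 'coil' in s or 'stress' in s or 'strain' in s or 'build' in s:
--         return 'MAGNETS_BUILD'
--     # Neutronics / wall / tbr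
--     if 'neutron' in s or 'tbr' in s or 'shield' in s:
--         return 'NEUTRONICS'
--     # Plant / power / economics
--     if 'net electric' in s or 'capex' in s or 'cost' in s or 'recirc' in s:
--         return 'PLANT_ECON'
--     return 'OTHER'
--
-- def mechanism_group_histogram(atlas: Dict[str, Any]) -> Dict[str, int]:
--     hist = mechanism_histogram(atlas)
--     out: Dict[str, int] = {}
--     for k, v in hist.items():
--         if k == 'ok':
--             continue
--         g = mechanism_group(k)
--         out[g] = int(out.get(g, 0) + int(v))
--     return out
-- ===== SOURCE B (Python) =====
-- from collections import Counter
--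
-- def mechanism_group(name: str) -> str:
--     s = str(name).lower()
--     if 'vs control' in s or 'pf waveform' in s or 'sol radiation fraction required' in s:
--         return 'CONTROL'
--     if 'divertor' in s or 'q_parallel' in s or 'q||' in s or 'sol' in s:
--         return 'EXHAUST'
--     if 'mhd' in s or 'beta' in s or 'q95' in s or 'greenwald' in s:
--         return 'PLASMA_LIMITS'
--     if 'tf ' in s or 'coil' in s or 'stress' in s or 'strain' in s or 'build' in s:
--         return 'MAGNETS_BUILD'
--     if 'neutron' in s or 'tbr' in s or 'shield' in s:
--         return 'NEUTRONICS'
--     if 'net electric' in s or 'capex' in s or 'cost' in s or 'recirc' in s: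
--         return 'PLANT_ECON'
--     return 'OTHER'
--
-- def mechanism_group_histogram(atlas):
--     dom = atlas.get('dominant')
--     if not isinstance(dom, list):
--         return {}
--     groups = [mechanism_group(str(x)) for row in dom if isinstance(row, list)
--               for x in row if str(x) and str(x) != 'ok']
--     return dict(Counter(groups))
-- ===== Notes on version B (the rewrite author's own statement) =====
-- stated objective: alternative
-- what changed: B drops A's per-name Counter-then-regroup dict machinery: it maps each surviving occurrence directly to its group name via a single flat comprehension and takes one Counter of that group list, instead of A's nested incremental Counter plus a second items() pass with out.get regrouping.
import Mathlib
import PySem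

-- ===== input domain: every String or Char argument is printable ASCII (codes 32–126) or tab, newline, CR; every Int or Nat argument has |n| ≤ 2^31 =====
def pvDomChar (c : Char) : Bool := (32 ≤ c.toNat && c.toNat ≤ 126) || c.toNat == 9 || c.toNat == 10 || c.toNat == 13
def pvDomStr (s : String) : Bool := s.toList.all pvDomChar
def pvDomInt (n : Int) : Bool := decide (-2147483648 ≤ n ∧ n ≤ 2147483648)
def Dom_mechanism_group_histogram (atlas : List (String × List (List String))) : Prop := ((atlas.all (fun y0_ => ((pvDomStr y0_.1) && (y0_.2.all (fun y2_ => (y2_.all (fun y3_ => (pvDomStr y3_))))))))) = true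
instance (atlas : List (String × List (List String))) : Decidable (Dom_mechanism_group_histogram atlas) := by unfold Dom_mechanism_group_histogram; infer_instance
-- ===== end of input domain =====

-- B replaces A's per-name-Counter-then-regroup dict machinery by one flat comprehension of
-- group names followed by a single Counter over it (objective: alternative decomposition).

-- shared helper: mechanism_group, the classifier both Python versions call verbatim
def pvGroup (name : String) : String :=
  let s := PySem.Str.lower name
  if PySem.Str.isIn "vs control" s || PySem.Str.isIn "pf waveform" s || PySem.Str.isIn "sol radiation fraction required" s then "CONTROL"
  else if PySem.Str.isIn "divertor" s || PySem.Str.isIn "q_parallel" s || PySem.Str.isIn "q||" s || PySem.Str.isIn "sol" s then "EXHAUST"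
  else if PySem.Str.isIn "mhd" s || PySem.Str.isIn "beta" s || PySem.Str.isIn "q95" s || PySem.Str.isIn "greenwald" s then "PLASMA_LIMITS"
  else if PySem.Str.isIn "tf " s || PySem.Str.isIn "coil" s || PySem.Str.isIn "stress" s || PySem.Str.isIn "strain" s || PySem.Str.isIn "build" s then "MAGNETS_BUILD"
  else if PySem.Str.isIn "neutron" s || PySem.Str.isIn "tbr" s || PySem.Str.isIn "shield" s then "NEUTRONICS"
  else if PySem.Str.isIn "net electric" s || PySem.Str.isIn "capex" s || PySem.Str.isIn "cost" s || PySem.Str.isIn "recirc" s then "PLANT_ECON"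
  else "OTHER"

-- ===== PORT A =====
-- A: mechanism_histogram builds a Counter of names (skipping empty strings), then
-- mechanism_group_histogram regroups its items (skipping key 'ok') into group buckets.
-- Under the declared type, 'dominant' maps to a list of lists of strings, so the
-- isinstance(..., list) checks are always true when the key is present, and str(x) = x.
def mechanism_group_histogram (atlas : List (String × List (List String))) : List (String × Int) :=
  match (PySem.Dict.mk atlas).get? "dominant" with
  | none => []
  | some dom =>
    -- mechanism_histogram: Counter c; c[s] += 1 for each non-empty s
    let c := dom.foldl (fun c row => row.foldl (fun c x =>
        if x = "" then c else c.modify x 0 (· + 1)) c) (PySem.Dict.empty : PySem.Dict String Int)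
    -- regroup: for k, v in hist.items(): skip 'ok'; out[g] = out.get(g, 0) + v
    (c.items.foldl (fun out kv =>
        if kv.1 = "ok" then out
        else
          let g := pvGroup kv.1
          out.insert g (out.getD g 0 + kv.2)) (PySem.Dict.empty : PySem.Dict String Int)).items

-- ===== PORT B =====
-- B: flat comprehension of group names (skipping '' and 'ok'), then one Counter of it.
def mechanism_group_histogram_alt (atlas : List (String × List (List String))) : List (String × Int) :=
  match (PySem.Dict.mk atlas).get? "dominant" with
  | none => []
  | some dom =>
    let groups := dom.flatMap (fun row =>
      (row.filter (fun x => !(x == "") && !(x == "ok"))).map pvGroup)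
    (PySem.Dict.counter groups).items

-- ===== PRECONDITION & SPEC =====
def Spec_mechanism_group_histogram (atlas : List (String × List (List String))) (out : List (String × Int)) : Prop := out = mechanism_group_histogram_alt atlas
instance (atlas : List (String × List (List String))) (out : List (String × Int)) : Decidable (Spec_mechanism_group_histogram atlas out) := by unfold Spec_mechanism_group_histogram; infer_instance

-- ===== CLAIM (what is proved, stated in full; the proofs are below) =====
def Claim_equal_mechanism_group_histogram : Prop := ∀ (atlas : List (String × List (List String))), Dom_mechanism_group_histogram atlas → Spec_mechanism_group_histogram atlas (mechanism_group_histogram atlas)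

-- ===== LEMMAS AND PROOFS =====

theorem pv_getD_ins_fold (g : String → String) (ps : List (String × Int)) (d : PySem.Dict String Int) (h : String) :
    (ps.foldl (fun out p => out.insert (g p.1) (out.getD (g p.1) 0 + p.2)) d).getD h 0
      = d.getD h 0 + ((ps.filter (fun p => g p.1 == h)).map (·.2)).sum := by
  induction ps generalizing d with
  | nil => simp
  | cons p ps ih =>
    simp only [List.foldl_cons, ih, List.filter_cons]
    by_cases hp : g p.1 = h
    · simp [hp]
      ring
    · have hne : h ≠ g p.1 := fun e => hp e.symm
      have : (g p.1 == h) = false := by simp [hp]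
      simp [this, PySem.Dict.getD_insert, hne]

theorem pv_sum_counts (g : String → String) (l N : List String) (h : String)
    (hl : l.Nodup) (hsub : ∀ x ∈ N, x ∈ l) :
    ((l.filter (fun k => g k == h)).map (fun k => (N.count k : Int))).sum
      = (N.countP (fun x => g x == h) : Int) := by
  induction N with
  | nil => simp
  | cons x N ih =>
    have hx : x ∈ l := hsub x (by simp)
    have hrest : ∀ y ∈ N, y ∈ l := fun y hy => hsub y (by simp [hy])
    have hcnt : ∀ k, ((x :: N).count k : Int) = (N.count k : Int) + (if x == k then (1:Int) else 0) := by
      intro k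
      rw [List.count_cons]
      push_cast
      by_cases hxk : x = k <;> simp [hxk]
    rw [List.map_congr_left (fun k _ => hcnt k), PySem.List.sum_map_add_int, ih hrest]
    have h2 : ((l.filter (fun k => g k == h)).map (fun k => if x == k then (1:Int) else 0)).sum
        = ((l.filter (fun k => g k == h)).countP (fun k => x == k) : Int) := by
      exact_mod_cast PySem.List.sum_map_ite_one_zero ..
    have h3 : (l.filter (fun k => g k == h)).countP (fun k => x == k)
        = (l.filter (fun k => g k == h)).count x := by
      rw [List.count_eq_countP]
      exact List.countP_congr (fun k _ => by simp only [beq_iff_eq]; exact eq_comm)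
    rw [h2, h3, List.countP_cons]
    by_cases hgx : g x = h
    · have h4 : (l.filter (fun k => g k == h)).count x = l.count x := by
        rw [List.count_filter]
        simp [hgx]
      have h5 : l.count x = 1 := List.count_eq_one_of_mem hl hx
      rw [h4, h5]
      simp [hgx]
    · have h4 : (l.filter (fun k => g k == h)).count x = 0 :=
        List.count_eq_zero_of_not_mem (by simp [List.mem_filter, hgx])
      rw [h4]
      simp [hgx]

theorem pv_filter_ofList (p : String → Bool) (M : List String) :
    (PySem.Set.ofList M).filter p = PySem.Set.ofList (M.filter p) := by
  induction M using List.reverseRecOn with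
  | nil => simp [PySem.Set.ofList_nil]
  | append_singleton M x ih =>
    rw [PySem.Set.ofList_append_singleton, List.filter_append]
    by_cases hmem : x ∈ M
    · rw [PySem.Set.add_of_mem ((PySem.Set.mem_ofList ..).mpr hmem)]
      by_cases hpx : p x
      · have hxf : x ∈ M.filter p := List.mem_filter.mpr ⟨hmem, hpx⟩
        rw [show List.filter p [x] = [x] from by simp [hpx], PySem.Set.ofList_append_singleton,
          PySem.Set.add_of_mem ((PySem.Set.mem_ofList ..).mpr hxf)]
        exact ih
      · rw [show List.filter p [x] = [] from by simp [hpx], List.append_nil]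
        exact ih
    · rw [PySem.Set.add_of_not_mem (fun hc => hmem ((PySem.Set.mem_ofList ..).mp hc)), List.filter_append]
      by_cases hpx : p x
      · have hxf : x ∉ M.filter p := fun hc => hmem (List.mem_filter.mp hc).1
        rw [show List.filter p [x] = [x] from by simp [hpx], PySem.Set.ofList_append_singleton,
          PySem.Set.add_of_not_mem (fun hc => hxf ((PySem.Set.mem_ofList ..).mp hc)), ih]
      · rw [show List.filter p [x] = [] from by simp [hpx]]
        simp [ih]

theorem pv_ofList_map_ofList (g : String → String) (N : List String) :
    PySem.Set.ofList ((PySem.Set.ofList N).map g) = PySem.Set.ofList (N.map g) := by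
  induction N using List.reverseRecOn with
  | nil => simp [PySem.Set.ofList_nil]
  | append_singleton N x ih =>
    rw [PySem.Set.ofList_append_singleton, List.map_append, List.map_singleton, PySem.Set.ofList_append_singleton]
    by_cases hmem : x ∈ N
    · rw [PySem.Set.add_of_mem ((PySem.Set.mem_ofList ..).mpr hmem), ih,
        PySem.Set.add_of_mem ((PySem.Set.mem_ofList ..).mpr (List.mem_map.mpr ⟨x, hmem, rfl⟩))]
    · rw [PySem.Set.add_of_not_mem (fun hc => hmem ((PySem.Set.mem_ofList ..).mp hc)),
        List.map_append, List.map_singleton, PySem.Set.ofList_append_singleton, ih]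

-- B's comprehension, flattened: per-row filter+map equals filter+map of the flattened rows
theorem pv_flatMap_filter_map (dom : List (List String)) (p : String → Bool) (g : String → String) :
    dom.flatMap (fun row => (row.filter p).map g) = (dom.flatten.filter p).map g := by
  induction dom with
  | nil => simp
  | cons row dom ih => simp [List.flatMap_cons, List.filter_append, List.map_append, ih]

-- the two ports' bodies agree for any value of atlas['dominant']
theorem pv_key (dom : List (List String)) :
    ((dom.foldl (fun c row => row.foldl (fun c x =>
        if x = "" then c else c.modify x 0 (· + 1)) c) (PySem.Dict.empty : PySem.Dict String Int)).items.foldl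
      (fun out kv =>
        if kv.1 = "ok" then out
        else
          let g := pvGroup kv.1
          out.insert g (out.getD g 0 + kv.2)) (PySem.Dict.empty : PySem.Dict String Int)).items
    = (PySem.Dict.counter (dom.flatMap (fun row =>
        (row.filter (fun x => !(x == "") && !(x == "ok"))).map pvGroup))).items := by
  rw [← List.foldl_flatten]
  -- A's inner fold (skip '') is the Counter of M, the flattened non-empty names
  have hA1 : dom.flatten.foldl (fun c x => if x = "" then c else c.modify x 0 (· + 1))
        (PySem.Dict.empty : PySem.Dict String Int)
      = PySem.Dict.counter (dom.flatten.filter (fun x => !(x == ""))) := by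
    rw [PySem.Dict.counter_eq_foldl, List.foldl_filter]
    congr 1
    funext c x
    by_cases hx : x = "" <;> simp [hx]
  rw [hA1]
  -- names surviving both skips, and their group list
  set M : List String := dom.flatten.filter (fun x => !(x == "")) with hM
  set N : List String := M.filter (fun k => !(k == "ok")) with hN
  -- B's comprehension is exactly N mapped through pvGroup
  have hB : dom.flatMap (fun row => (row.filter (fun x => !(x == "") && !(x == "ok"))).map pvGroup)
      = N.map pvGroup := by
    rw [pv_flatMap_filter_map, hN, hM, List.filter_filter,
      List.filter_congr (fun a _ => Bool.and_comm (!(a == "")) (!(a == "ok")))]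
  rw [hB]
  -- A's outer fold: drop the 'ok' skip by filtering the items
  have hA2 : (PySem.Dict.counter M).items.foldl
      (fun out kv =>
        if kv.1 = "ok" then out
        else
          let g := pvGroup kv.1
          out.insert g (out.getD g 0 + kv.2)) (PySem.Dict.empty : PySem.Dict String Int)
      = ((PySem.Dict.counter M).items.filter (fun kv => !(kv.1 == "ok"))).foldl
        (fun out kv => out.insert (pvGroup kv.1) (out.getD (pvGroup kv.1) 0 + kv.2))
        (PySem.Dict.empty : PySem.Dict String Int) := by
    rw [List.foldl_filter]
    congr 1
    funext out kv
    by_cases hk : kv.1 = "ok" <;> simp [hk]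
  rw [hA2]
  -- the filtered items are exactly the distinct names of N with their multiplicities in N
  have hitems : (PySem.Dict.counter M).items.filter (fun kv => !(kv.1 == "ok"))
      = (PySem.Set.ofList N).map (fun k => (k, (N.count k : Int))) := by
    rw [PySem.Dict.items_counter, List.filter_map]
    have h1 : ((PySem.Set.ofList M).filter ((fun kv : String × Int => !(kv.1 == "ok")) ∘ (fun k => (k, (M.count k : Int)))))
        = (PySem.Set.ofList M).filter (fun k => !(k == "ok")) := by
      congr 1
    rw [h1, pv_filter_ofList, ← hN]
    apply List.map_congr_left
    intro k hk
    have hkN : k ∈ N := (PySem.Set.mem_ofList ..).mp hk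
    have hkN2 : k ∈ M.filter (fun k => !(k == "ok")) := by rw [hN] at hkN; exact hkN
    have hkok : (!(k == "ok")) = true := (List.mem_filter.mp hkN2).2
    have : N.count k = M.count k := by
      rw [hN, List.count_filter]
      simp at hkok
      simp [hkok]
    rw [this]
  rw [hitems]
  -- now compare items: same keys (first-occurrence order of groups), same counts
  have hnodup : (((PySem.Set.ofList N).map (fun k => (k, (N.count k : Int)))).foldl
      (fun out kv => out.insert (pvGroup kv.1) (out.getD (pvGroup kv.1) 0 + kv.2))
      (PySem.Dict.empty : PySem.Dict String Int)).keys.Nodup := by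
    apply PySem.Dict.nodup_keys_foldl_insert_key
    simp
  have hkeys : (((PySem.Set.ofList N).map (fun k => (k, (N.count k : Int)))).foldl
      (fun out kv => out.insert (pvGroup kv.1) (out.getD (pvGroup kv.1) 0 + kv.2))
      (PySem.Dict.empty : PySem.Dict String Int)).keys = PySem.Set.ofList (N.map pvGroup) := by
    rw [PySem.Dict.keys_foldl_insert_key, List.map_map]
    have h1 : ((fun kv : String × Int => pvGroup kv.1) ∘ (fun k => (k, (N.count k : Int)))) = pvGroup := by
      funext k; rfl
    rw [h1]
    have h2 : PySem.Set.update (PySem.Dict.empty : PySem.Dict String Int).keys ((PySem.Set.ofList N).map pvGroup)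
        = PySem.Set.ofList ((PySem.Set.ofList N).map pvGroup) := by
      simp [PySem.Set.update, PySem.Set.ofList_eq_foldl, PySem.Dict.keys_empty]
    rw [h2, pv_ofList_map_ofList]
  rw [PySem.Dict.items_eq_map_keys _ hnodup 0, PySem.Dict.items_eq_map_keys _ (PySem.Dict.nodup_keys_counter _) 0,
    hkeys, PySem.Dict.keys_counter]
  apply List.map_congr_left
  intro h hh
  have hgetD : (((PySem.Set.ofList N).map (fun k => (k, (N.count k : Int)))).foldl
      (fun out kv => out.insert (pvGroup kv.1) (out.getD (pvGroup kv.1) 0 + kv.2))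
      (PySem.Dict.empty : PySem.Dict String Int)).getD h 0 = (N.countP (fun x => pvGroup x == h) : Int) := by
    rw [pv_getD_ins_fold, PySem.Dict.getD_empty, List.filter_map, List.map_map]
    have h1 : ((fun p : String × Int => pvGroup p.1 == h) ∘ (fun k => (k, (N.count k : Int))))
        = (fun k => pvGroup k == h) := by funext k; rfl
    have h2 : ((fun x : String × Int => x.2) ∘ (fun k => (k, (N.count k : Int))))
        = (fun k => (N.count k : Int)) := by funext k; rfl
    rw [h1, h2, pv_sum_counts pvGroup (PySem.Set.ofList N) N h (PySem.Set.nodup_ofList ..)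
      (fun x hx => (PySem.Set.mem_ofList ..).mpr hx)]
    ring
  have hcnt : ((N.map pvGroup).count h : Int) = (N.countP (fun x => pvGroup x == h) : Int) := by
    rw [List.count_eq_countP, List.countP_map]
    rfl
  rw [hgetD, PySem.Dict.getD_counter, hcnt]

-- ===== VERDICT (by name: the statement is the Claim_ definition above) =====
theorem mechanism_group_histogram_spec : Claim_equal_mechanism_group_histogram := by
  intro atlas _
  unfold Spec_mechanism_group_histogram mechanism_group_histogram mechanism_group_histogram_alt
  cases (PySem.Dict.mk atlas).get? "dominant" with
  | none => rfl
  | some dom => exact pv_key dom
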